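-- pv_equiv track=rewrite | github.com/adnaksbhat/Colab_JupyterNotebooks | RefFinder/new_the.py | expand_query_with_synonyms
-- ===== SOURCE A (Python) =====
-- from typing import List, Dict, Any
--
-- def expand_query_with_synonyms(query: str, synonym_dict: Dict[str, List[str]]) -> str:
--     """Expands the query with synonyms from the synonym dictionary, handling multi-word synonyms."""
--     expanded_terms = []
--     query_terms = query.split()
--     i = 0
--     while i < len(query_terms):
--         term = query_terms[i].lower()
--         found_synonym = False
--         # Check for multi-word synonyms
--         for syn_key, syn_values in synonym_dict.items():
--             syn_key_terms = syn_key.split()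
--             if len(syn_key_terms) > 1 and i + len(syn_key_terms) <= len(query_terms):
--                 if query_terms[i:i + len(syn_key_terms)] == [t.lower() for t in syn_key_terms]:
--                     expanded_terms.append(f"({' '.join([syn_key] + syn_values)})")
--                     i += len(syn_key_terms)
--                     found_synonym = True
--                     break
--         if not found_synonym:
--             if term in synonym_dict:
--                 # Check if the synonym key is a multi-word term
--                 if len(synonym_dict[term][0].split()) > 1:
--                     expanded_terms.append(f"({' '.join([term] + synonym_dict[term])})")
--                 else:
--                     expanded_terms.append(f"({' '.join([term] + synonym_dict[term])})")
--             else: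
--                 expanded_terms.append(term)
--             i += 1
--     return " ".join(expanded_terms)
-- ===== SOURCE B (Python) =====
-- def expand_query_with_synonyms(query: str, synonym_dict) -> str:
--     """Same expansion, restructured: multi-word keys are pre-indexed once in a hash
--     map keyed by their lowered term tuple (with dict-order index), grouped by key
--     length; each query position then does one lookup per distinct key length and
--     keeps the minimum-index hit, instead of scanning the whole dictionary."""
--     multi = {}          # lowered term tuple -> (order, length, formatted)
--     lengths = set()
--     for order, (k, vs) in enumerate(synonym_dict.items()):
--         kts = k.split()
--         if len(kts) > 1:
--             tup = tuple(t.lower() for t in kts)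
--             if tup not in multi:
--                 multi[tup] = (order, len(kts), "(" + " ".join([k] + vs) + ")")
--             lengths.add(len(kts))
--     lengths = sorted(lengths)
--     terms = query.split()
--     n = len(terms)
--     out = []
--     i = 0
--     while i < n:
--         best = None
--         for L in lengths:
--             if i + L <= n:
--                 hit = multi.get(tuple(terms[i:i + L]))
--                 if hit is not None and (best is None or hit[0] < best[0]):
--                     best = hit
--         if best is not None:
--             out.append(best[2])
--             i += best[1]
--         else:
--             t = terms[i].lower()
--             vs = synonym_dict.get(t)
--             if vs is not None:
--                 out.append("(" + " ".join([t] + vs) + ")")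
--             else:
--                 out.append(t)
--             i += 1
--     return " ".join(out)
-- ===== Notes on version B (the rewrite author's own statement) =====
-- stated objective: alternative
-- what changed: B precomputes one hash map from lowered multi-word key tuples to (dict-order index, length, formatted expansion) plus the set of distinct multi-word key lengths, so each query position does one lookup per distinct key length (choosing the minimum-index hit) instead of rescanning and re-splitting the whole synonym dictionary; A's duplicated dead if-branch is also collapsed.
-- outside the precondition, e.g. on expand_query_with_synonyms('x a', {'x a': ['q'], 'a': []}): A returns '(x a q)', B returns '(x a q)'
import Mathlib
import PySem

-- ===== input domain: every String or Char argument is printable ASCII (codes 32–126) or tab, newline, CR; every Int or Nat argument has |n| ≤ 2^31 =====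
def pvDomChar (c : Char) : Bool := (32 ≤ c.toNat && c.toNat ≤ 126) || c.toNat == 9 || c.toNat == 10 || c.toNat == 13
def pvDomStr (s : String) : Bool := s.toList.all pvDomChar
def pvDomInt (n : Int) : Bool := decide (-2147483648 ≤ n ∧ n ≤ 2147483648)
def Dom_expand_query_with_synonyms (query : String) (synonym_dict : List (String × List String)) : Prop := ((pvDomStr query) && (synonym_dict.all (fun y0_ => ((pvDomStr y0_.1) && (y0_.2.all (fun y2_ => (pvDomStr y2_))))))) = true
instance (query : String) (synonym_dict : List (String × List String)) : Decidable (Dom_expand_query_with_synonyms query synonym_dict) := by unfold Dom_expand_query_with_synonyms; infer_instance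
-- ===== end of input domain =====

-- B replaces A's per-position scan of the whole dictionary by a precomputed hash map from
-- lowered multi-word key tuples (with dict-order index) plus the set of distinct key lengths:
-- one min-index lookup per distinct length per position (objective: alternative algorithm).

-- ===== PORT A =====

-- first-match association-list lookup: Python's 'term in d' / 'd[term]' / 'd.get(term)'
def pvLookup : List (String × List String) → String → Option (List String)
  | [], _ => none
  | (k, vs) :: rest, t => if k == t then some vs else pvLookup rest t

-- A's inner 'for syn_key, syn_values in synonym_dict.items(): … break' loop
def pvAFind (qts : List String) (i : Nat) : List (String × List String) → Option (String × List String)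
  | [] => none
  | (k, vs) :: rest =>
      let kts := PySem.Str.split₀ k
      if 1 < kts.length ∧ i + kts.length ≤ qts.length ∧
          PySem.List.slice qts (some (i : Int)) (some ((i : Int) + (kts.length : Int)))
            = kts.map PySem.Str.lower
      then some (k, vs)
      else pvAFind qts i rest

-- termination helper for pvALoop (cited in decreasing_by)
theorem pvAFind_len {qts : List String} {i : Nat} {d : List (String × List String)}
    {k : String} {vs : List String} (h : pvAFind qts i d = some (k, vs)) :
    1 < (PySem.Str.split₀ k).length := by
  induction d with
  | nil => simp [pvAFind] at h
  | cons p rest ih =>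
      obtain ⟨k', vs'⟩ := p
      simp only [pvAFind] at h
      split at h
      · rename_i hc
        injection h with h'
        injection h' with hk hvs
        subst hk
        exact hc.1
      · exact ih h

-- A's 'while i < len(query_terms)' loop
def pvALoop (qts : List String) (d : List (String × List String)) (i : Nat)
    (acc : List String) : List String :=
  if _h : i < qts.length then
    match hf : pvAFind qts i d with
    | some (k, vs) =>
        pvALoop qts d (i + (PySem.Str.split₀ k).length)
          (acc ++ ["(" ++ PySem.Str.join " " (k :: vs) ++ ")"])
    | none =>
        let term := PySem.Str.lower (qts.getD i "")
        match pvLookup d term with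
        | some vs =>
            -- Python indexes synonym_dict[term][0]: IndexError on an empty value list;
            -- that case is excluded by Pre_, '.headD ""' is the total stand-in
            if 1 < (PySem.Str.split₀ (vs.headD "")).length then
              pvALoop qts d (i + 1) (acc ++ ["(" ++ PySem.Str.join " " (term :: vs) ++ ")"])
            else
              pvALoop qts d (i + 1) (acc ++ ["(" ++ PySem.Str.join " " (term :: vs) ++ ")"])
        | none => pvALoop qts d (i + 1) (acc ++ [term])
  else acc
termination_by qts.length - i
decreasing_by
  · have := pvAFind_len hf; omega
  · omega
  · omega
  · omega

def expand_query_with_synonyms (query : String) (synonym_dict : List (String × List String)) : String :=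
  PySem.Str.join " " (pvALoop (PySem.Str.split₀ query) synonym_dict 0 [])

-- ===== PORT B =====

-- B's build pass: multi-word map (lowered tuple ↦ (order, length, formatted)) and the length set
def pvBuild (d : List (String × List String)) :
    PySem.Dict (List String) (Int × Nat × String) × PySem.Set Nat :=
  (PySem.List.enumerate d 0).foldl
    (fun st p =>
      let kts := PySem.Str.split₀ p.2.1
      if 1 < kts.length then
        ((if st.1.contains (kts.map PySem.Str.lower) then st.1
          else st.1.insert (kts.map PySem.Str.lower)
            (p.1, kts.length, "(" ++ PySem.Str.join " " (p.2.1 :: p.2.2) ++ ")")),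
         PySem.Set.add st.2 kts.length)
      else st)
    (PySem.Dict.empty, PySem.Set.empty)

-- B's 'for L in lengths' scan at one position, keeping the minimum-order hit
def pvBBest (multi : PySem.Dict (List String) (Int × Nat × String)) (qts : List String)
    (Ls : List Nat) (i : Nat) : Option (Int × Nat × String) :=
  Ls.foldl
    (fun best L =>
      if i + L ≤ qts.length then
        match multi.get? (PySem.List.slice qts (some (i : Int)) (some ((i : Int) + (L : Int)))) with
        | some hit =>
            match best with
            | none => some hit
            | some b => if hit.1 < b.1 then some hit else some b
        | none => best
      else best)
    none

-- termination helpers for pvBLoop (cited in decreasing_by)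
theorem pvBuild_aux_pos (l : List (Int × (String × List String)))
    (st0 : PySem.Dict (List String) (Int × Nat × String) × PySem.Set Nat)
    (h0 : ∀ tup o L s, st0.1.get? tup = some (o, L, s) → 0 < L) :
    ∀ tup o L s,
      (l.foldl (fun st p =>
        let kts := PySem.Str.split₀ p.2.1
        if 1 < kts.length then
          ((if st.1.contains (kts.map PySem.Str.lower) then st.1
            else st.1.insert (kts.map PySem.Str.lower)
              (p.1, kts.length, "(" ++ PySem.Str.join " " (p.2.1 :: p.2.2) ++ ")")),
           PySem.Set.add st.2 kts.length)
        else st) st0).1.get? tup = some (o, L, s) → 0 < L := by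
  induction l generalizing st0 with
  | nil => exact h0
  | cons p l ih =>
      intro tup o L s h
      simp only [List.foldl_cons] at h
      refine ih _ ?_ tup o L s h
      intro tup' o' L' s' h'
      simp only at h'
      split at h'
      · rename_i hlen
        split at h'
        · exact h0 _ _ _ _ h'
        · rw [PySem.Dict.get?_insert] at h'
          split at h'
          · cases h'; omega
          · exact h0 _ _ _ _ h'
      · exact h0 _ _ _ _ h'

theorem pvBuild_get_pos {d : List (String × List String)} {tup : List String}
    {o : Int} {L : Nat} {s : String}
    (h : (pvBuild d).1.get? tup = some (o, L, s)) : 0 < L := by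
  refine pvBuild_aux_pos _ _ ?_ tup o L s h
  intro tup' o' L' s' h'
  simp [PySem.Dict.get?_empty] at h'

theorem pvBBest_aux (multi : PySem.Dict (List String) (Int × Nat × String))
    (qts : List String) (i : Nat) (Ls : List Nat) :
    ∀ b0 : Option (Int × Nat × String),
      (b0 = none ∨ ∃ tup h, b0 = some h ∧ multi.get? tup = some h) →
      (Ls.foldl
        (fun best L =>
          if i + L ≤ qts.length then
            match multi.get? (PySem.List.slice qts (some (i : Int)) (some ((i : Int) + (L : Int)))) with
            | some hit =>
                match best with
                | none => some hit
                | some b => if hit.1 < b.1 then some hit else some b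
            | none => best
          else best) b0) = none ∨
      ∃ tup h, (Ls.foldl
        (fun best L =>
          if i + L ≤ qts.length then
            match multi.get? (PySem.List.slice qts (some (i : Int)) (some ((i : Int) + (L : Int)))) with
            | some hit =>
                match best with
                | none => some hit
                | some b => if hit.1 < b.1 then some hit else some b
            | none => best
          else best) b0) = some h ∧ multi.get? tup = some h := by
  induction Ls with
  | nil => intro b0 h0; simpa using h0
  | cons L Ls ih =>
      intro b0 h0
      simp only [List.foldl_cons]
      apply ih
      by_cases hle : i + L ≤ qts.length
      · simp only [if_pos hle]
        cases hg : multi.get? (PySem.List.slice qts (some (i : Int)) (some ((i : Int) + (L : Int)))) with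
        | none => exact h0
        | some hit =>
            cases h0 with
            | inl h => subst h; exact Or.inr ⟨_, hit, rfl, hg⟩
            | inr h =>
                obtain ⟨tup, hb, rfl, hg'⟩ := h
                by_cases hlt : hit.1 < hb.1
                · simp only [if_pos hlt]; exact Or.inr ⟨_, hit, rfl, hg⟩
                · simp only [if_neg hlt]; exact Or.inr ⟨tup, hb, rfl, hg'⟩
      · simp only [if_neg hle]; exact h0

theorem pvBBest_get {multi : PySem.Dict (List String) (Int × Nat × String)}
    {qts : List String} {Ls : List Nat} {i : Nat} {h : Int × Nat × String}
    (hb : pvBBest multi qts Ls i = some h) : ∃ tup, multi.get? tup = some h := by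
  have := pvBBest_aux multi qts i Ls none (Or.inl rfl)
  rw [pvBBest] at hb
  rcases this with h1 | ⟨tup, h', h1, h2⟩
  · rw [hb] at h1; cases h1
  · rw [hb] at h1; cases h1; exact ⟨tup, h2⟩


theorem pvBBest_build_pos {d : List (String × List String)} {qts : List String}
    {Ls : List Nat} {i : Nat} {h : Int × Nat × String}
    (hb : pvBBest (pvBuild d).1 qts Ls i = some h) : 0 < h.2.1 := by
  obtain ⟨tup, ht⟩ := pvBBest_get hb
  exact pvBuild_get_pos (tup := tup) (o := h.1) (s := h.2.2) (by rw [ht])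

-- B's 'while i < n' loop ('pvBuild d' is the loop-invariant precomputation done once in Source B;
-- naming it per unfolding changes nothing semantically and lets termination cite pvBBest_build_pos)
def pvBLoop (qts : List String) (d : List (String × List String)) (i : Nat)
    (acc : List String) : List String :=
  if _h : i < qts.length then
    match hb : pvBBest (pvBuild d).1 qts
        (PySem.List.sorted (pvBuild d).2 (fun x => x) false) i with
    | some hit => pvBLoop qts d (i + hit.2.1) (acc ++ [hit.2.2])
    | none =>
        let t := PySem.Str.lower (qts.getD i "")
        match pvLookup d t with
        | some vs => pvBLoop qts d (i + 1) (acc ++ ["(" ++ PySem.Str.join " " (t :: vs) ++ ")"])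
        | none => pvBLoop qts d (i + 1) (acc ++ [t])
  else acc
termination_by qts.length - i
decreasing_by
  · have := pvBBest_build_pos hb; omega
  · omega
  · omega

def expand_query_with_synonyms_alt (query : String) (synonym_dict : List (String × List String)) : String :=
  PySem.Str.join " " (pvBLoop (PySem.Str.split₀ query) synonym_dict 0 [])

-- ===== PRECONDITION & SPEC =====
-- Pre_ excludes inputs where some synonym key with an EMPTY value list occurs among the lowered
-- query tokens: when such a token is expanded as a single word, Python A raises IndexError on
-- synonym_dict[term][0] (if the token happens to be consumed by a multi-word match A still returns;
-- see the cite in claim.json).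
def Pre_expand_query_with_synonyms (query : String) (synonym_dict : List (String × List String)) : Prop :=
  ∀ p ∈ synonym_dict, p.2 = [] → p.1 ∉ (PySem.Str.split₀ query).map PySem.Str.lower
instance (query : String) (synonym_dict : List (String × List String)) : Decidable (Pre_expand_query_with_synonyms query synonym_dict) := by unfold Pre_expand_query_with_synonyms; infer_instance

def pvWitness_expand_query_with_synonyms : String × (List (String × List String)) :=
  ("machine learning and ai", [("machine learning", ["ml"]), ("ai", ["artificial", "intelligence"])])

def Spec_expand_query_with_synonyms (query : String) (synonym_dict : List (String × List String)) (out : String) : Prop := out = expand_query_with_synonyms_alt query synonym_dict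
instance (query : String) (synonym_dict : List (String × List String)) (out : String) : Decidable (Spec_expand_query_with_synonyms query synonym_dict out) := by unfold Spec_expand_query_with_synonyms; infer_instance

-- ===== CLAIM (what is proved, stated in full; the proofs are below) =====
def Claim_equal_expand_query_with_synonyms : Prop := ∀ (query : String) (synonym_dict : List (String × List String)), Dom_expand_query_with_synonyms query synonym_dict → Pre_expand_query_with_synonyms query synonym_dict → Spec_expand_query_with_synonyms query synonym_dict (expand_query_with_synonyms query synonym_dict)

-- ===== LEMMAS AND PROOFS =====


-- lowered term tuple / term count / formatted entry of a dictionary item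
def pvTup (k : String) : List String := (PySem.Str.split₀ k).map PySem.Str.lower

def pvLen (k : String) : Nat := (PySem.Str.split₀ k).length

def pvF (p : Int × (String × List String)) : Int × Nat × String :=
  (p.1, pvLen p.2.1, "(" ++ PySem.Str.join " " (p.2.1 :: p.2.2) ++ ")")

-- "entry k is a multi-word match at position i"
abbrev pvQ (qts : List String) (i : Nat) (k : String) : Prop :=
  1 < pvLen k ∧ i + pvLen k ≤ qts.length ∧
    PySem.List.slice qts (some (i : Int)) (some ((i : Int) + ((pvLen k : Nat) : Int)))
      = pvTup k

-- A's inner loop is the first enumerate entry satisfying pvQ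
theorem pvAFind_eq (qts : List String) (i : Nat) :
    ∀ (l : List (String × List String)) (s : Int),
      pvAFind qts i l
        = ((PySem.List.enumerate l s).find? (fun p => decide (pvQ qts i p.2.1))).map
            (fun p => (p.2.1, p.2.2)) := by
  intro l
  induction l with
  | nil => intro s; simp [pvAFind, PySem.List.enumerate_nil]
  | cons p l ih =>
      intro s
      obtain ⟨k, vs⟩ := p
      rw [PySem.List.enumerate_cons]
      by_cases hq : pvQ qts i k
      · rw [List.find?_cons_of_pos (by simpa using hq)]
        simp only [pvAFind, pvQ, pvLen, pvTup] at hq ⊢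
        rw [if_pos hq]
        rfl
      · rw [List.find?_cons_of_neg (by simpa using hq)]
        simp only [pvAFind, pvQ, pvLen, pvTup] at hq ⊢
        rw [if_neg hq]
        exact ih (s + 1)


-- the built map looked up at tup is the first multi-word entry whose lowered tuple is tup
theorem pvBuild_aux_get (tup : List String) :
    ∀ (l : List (Int × (String × List String)))
      (st0 : PySem.Dict (List String) (Int × Nat × String) × PySem.Set Nat),
      (l.foldl (fun st p =>
        let kts := PySem.Str.split₀ p.2.1
        if 1 < kts.length then
          ((if st.1.contains (kts.map PySem.Str.lower) then st.1
            else st.1.insert (kts.map PySem.Str.lower)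
              (p.1, kts.length, "(" ++ PySem.Str.join " " (p.2.1 :: p.2.2) ++ ")")),
           PySem.Set.add st.2 kts.length)
        else st) st0).1.get? tup
      = match st0.1.get? tup with
        | some v => some v
        | none => (l.find? (fun p => decide (1 < pvLen p.2.1 ∧ pvTup p.2.1 = tup))).map pvF := by
  intro l
  induction l with
  | nil =>
      intro st0
      simp only [List.foldl_nil, List.find?_nil, Option.map_none]
      cases st0.1.get? tup <;> rfl
  | cons p l ih =>
      intro st0
      simp only [List.foldl_cons]
      by_cases hlen : 1 < (PySem.Str.split₀ p.2.1).length
      · by_cases htup : pvTup p.2.1 = tup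
        · rw [List.find?_cons_of_pos (by
            simp only [pvLen, pvTup, decide_eq_true_eq]; exact ⟨hlen, htup⟩)]
          rw [ih]
          simp only [hlen, if_pos]
          by_cases hc : st0.1.contains ((PySem.Str.split₀ p.2.1).map PySem.Str.lower)
          · rw [if_pos hc]
            have : (st0.1.get? tup).isSome := by
              rw [← PySem.Dict.contains_eq_isSome_get?]
              simpa [pvTup] using htup ▸ hc
            obtain ⟨v, hv⟩ := Option.isSome_iff_exists.mp this
            simp [hv]
          · rw [if_neg hc]
            have hnone : st0.1.get? tup = none := by
              have := PySem.Dict.contains_eq_isSome_get? (d := st0.1)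
                (k := (PySem.Str.split₀ p.2.1).map PySem.Str.lower)
              rw [Bool.eq_false_iff.mpr hc] at this
              have h2 : (st0.1.get? ((PySem.Str.split₀ p.2.1).map PySem.Str.lower)).isSome = false := this.symm
              rw [Option.isSome_eq_false_iff, Option.isNone_iff_eq_none] at h2
              simpa [pvTup] using htup ▸ h2
            rw [hnone]
            rw [PySem.Dict.get?_insert]
            rw [if_pos (by simpa [pvTup] using htup.symm)]
            simp [pvF, pvLen]
        · rw [List.find?_cons_of_neg (by
            simp only [pvLen, pvTup, decide_eq_true_eq]; exact fun h => htup h.2)]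
          rw [ih]
          simp only [hlen, if_pos]
          by_cases hc : st0.1.contains ((PySem.Str.split₀ p.2.1).map PySem.Str.lower)
          · rw [if_pos hc]
          · rw [if_neg hc]
            rw [PySem.Dict.get?_insert]
            rw [if_neg (by simpa [pvTup] using fun h => htup h.symm)]
      · rw [List.find?_cons_of_neg (by
            simp only [pvLen, pvTup, decide_eq_true_eq]; exact fun h => hlen h.1)]
        simp only [hlen, ite_false]
        exact ih st0

theorem pvBuild_get_eq (d : List (String × List String)) (tup : List String) :
    (pvBuild d).1.get? tup
      = ((PySem.List.enumerate d 0).find?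
          (fun p => decide (1 < pvLen p.2.1 ∧ pvTup p.2.1 = tup))).map pvF := by
  have := pvBuild_aux_get tup (PySem.List.enumerate d 0) (PySem.Dict.empty, PySem.Set.empty)
  rw [pvBuild]
  rw [this]
  simp [PySem.Dict.get?_empty]


-- every multi-word entry's length reaches the length set
theorem pvBuild_aux_len :
    ∀ (l : List (Int × (String × List String)))
      (st0 : PySem.Dict (List String) (Int × Nat × String) × PySem.Set Nat),
      (∀ x, x ∈ st0.2 → x ∈ (l.foldl (fun st p =>
        let kts := PySem.Str.split₀ p.2.1
        if 1 < kts.length then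
          ((if st.1.contains (kts.map PySem.Str.lower) then st.1
            else st.1.insert (kts.map PySem.Str.lower)
              (p.1, kts.length, "(" ++ PySem.Str.join " " (p.2.1 :: p.2.2) ++ ")")),
           PySem.Set.add st.2 kts.length)
        else st) st0).2) ∧
      (∀ p ∈ l, 1 < pvLen p.2.1 → pvLen p.2.1 ∈ (l.foldl (fun st p =>
        let kts := PySem.Str.split₀ p.2.1
        if 1 < kts.length then
          ((if st.1.contains (kts.map PySem.Str.lower) then st.1
            else st.1.insert (kts.map PySem.Str.lower)
              (p.1, kts.length, "(" ++ PySem.Str.join " " (p.2.1 :: p.2.2) ++ ")")),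
           PySem.Set.add st.2 kts.length)
        else st) st0).2) := by
  intro l
  induction l with
  | nil => intro st0; exact ⟨fun x hx => hx, fun p hp => absurd hp (List.not_mem_nil)⟩
  | cons p l ih =>
      intro st0
      simp only [List.foldl_cons]
      constructor
      · intro x hx
        refine (ih _).1 x ?_
        by_cases hlen : 1 < (PySem.Str.split₀ p.2.1).length
        · simp only [hlen, if_pos]
          exact (PySem.Set.mem_add _ _ _).mpr (Or.inl hx)
        · simpa [hlen] using hx
      · intro q hq hql
        rcases List.mem_cons.mp hq with rfl | hq'
        · refine (ih _).1 _ ?_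
          simp only [pvLen] at hql
          simp only [hql, if_pos]
          exact (PySem.Set.mem_add _ _ _).mpr (Or.inr rfl)
        · exact (ih _).2 q hq' hql

theorem pvBuild_len_mem {d : List (String × List String)}
    {p : Int × (String × List String)} (hp : p ∈ PySem.List.enumerate d 0)
    (hl : 1 < pvLen p.2.1) : pvLen p.2.1 ∈ (pvBuild d).2 :=
  (pvBuild_aux_len (PySem.List.enumerate d 0) (PySem.Dict.empty, PySem.Set.empty)).2 p hp hl

-- generic: the first q-element is also the first q'-element when q' is stronger and holds at it
theorem pvFind?_stronger {α : Type} {l : List α} {q q' : α → Bool} {a : α}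
    (himp : ∀ x, q' x = true → q x = true) (hf : l.find? q = some a)
    (ha : q' a = true) : l.find? q' = some a := by
  induction l with
  | nil => simp at hf
  | cons x l ih =>
      by_cases hx : q' x = true
      · have hqx := himp x hx
        rw [List.find?_cons_of_pos hqx] at hf
        cases hf
        rw [List.find?_cons_of_pos hx]
      · cases hqx : q x with
        | true =>
            rw [List.find?_cons_of_pos hqx] at hf
            cases hf
            exact absurd ha hx
        | false =>
            rw [List.find?_cons_of_neg (by simp [hqx])] at hf
            rw [List.find?_cons_of_neg (by simp [hx])]
            exact ih hf
  -- note: `cases hf` uses injectivity of `some`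

-- generic: the first q-element is R-minimal among q-elements of a pairwise list
theorem pvFind?_min {α : Type} {R : α → α → Prop} {l : List α} {q : α → Bool} {a : α}
    (hp : l.Pairwise R) (hf : l.find? q = some a) :
    ∀ x ∈ l, q x = true → a = x ∨ R a x := by
  induction l with
  | nil => simp at hf
  | cons y l ih =>
      obtain ⟨hy, hp'⟩ := List.pairwise_cons.mp hp
      cases hqy : q y with
      | true =>
          rw [List.find?_cons_of_pos hqy] at hf
          cases hf
          intro x hx _
          rcases List.mem_cons.mp hx with rfl | hx'
          · exact Or.inl rfl
          · exact Or.inr (hy x hx')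
      | false =>
          rw [List.find?_cons_of_neg (by simp [hqy])] at hf
          intro x hx hqx
          rcases List.mem_cons.mp hx with rfl | hx'
          · rw [hqy] at hqx; cases hqx
          · exact ih hp' hf x hx' hqx

-- enumerate indices determine the entry
theorem pvEnum_fst_inj {α : Type} {d : List α} {p q : Int × α}
    (hp : p ∈ PySem.List.enumerate d 0) (hq : q ∈ PySem.List.enumerate d 0)
    (h : p.1 = q.1) : p = q := by
  obtain ⟨kp, hkp, rfl⟩ := (PySem.List.mem_enumerate_iff _ _ _).mp hp
  obtain ⟨kq, hkq, rfl⟩ := (PySem.List.mem_enumerate_iff _ _ _).mp hq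
  simp only [zero_add] at h ⊢
  have : kp = kq := by exact_mod_cast h
  subst this
  rfl


-- candidate at position i for key length L, and the generic min-keeping fold step
def pvCand (d : List (String × List String)) (qts : List String) (i L : Nat) :
    Option (Int × Nat × String) :=
  if i + L ≤ qts.length then
    (pvBuild d).1.get? (PySem.List.slice qts (some (i : Int)) (some ((i : Int) + (L : Int))))
  else none

def pvStepC (c : Nat → Option (Int × Nat × String))
    (best : Option (Int × Nat × String)) (L : Nat) : Option (Int × Nat × String) :=
  match c L with
  | some hit =>
      match best with
      | none => some hit
      | some b => if hit.1 < b.1 then some hit else some b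
  | none => best

theorem pvBBest_eq_foldCand (d : List (String × List String)) (qts : List String)
    (Ls : List Nat) (i : Nat) :
    pvBBest (pvBuild d).1 qts Ls i = Ls.foldl (pvStepC (pvCand d qts i)) none := by
  rw [pvBBest]
  congr 1
  funext best L
  by_cases h : i + L ≤ qts.length <;> simp [pvStepC, pvCand, h]

theorem pvFoldNone (c : Nat → Option (Int × Nat × String)) :
    ∀ Ls : List Nat, (∀ L ∈ Ls, c L = none) →
      Ls.foldl (pvStepC c) none = none := by
  intro Ls h
  induction Ls with
  | nil => rfl
  | cons L Ls ih =>
      rw [List.foldl_cons]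
      have hc := h L (List.mem_cons_self)
      have : pvStepC c none L = none := by simp [pvStepC, hc]
      rw [this]
      exact ih (fun L' hL' => h L' (List.mem_cons_of_mem _ hL'))

theorem pvFoldPre (c : Nat → Option (Int × Nat × String)) (h0 : Int × Nat × String) :
    ∀ (Ls : List Nat) (b0 : Option (Int × Nat × String)),
      (∀ L ∈ Ls, ∀ h, c L = some h → h0.1 ≤ h.1 ∧ (h.1 = h0.1 → h = h0)) →
      (b0 = none ∨ ∃ h', b0 = some h' ∧ h0.1 ≤ h'.1 ∧ (h'.1 = h0.1 → h' = h0)) →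
      (Ls.foldl (pvStepC c) b0 = none ∨
        ∃ h', Ls.foldl (pvStepC c) b0 = some h' ∧ h0.1 ≤ h'.1 ∧ (h'.1 = h0.1 → h' = h0)) := by
  intro Ls
  induction Ls with
  | nil => intro b0 _ hb; simpa using hb
  | cons L Ls ih =>
      intro b0 hall hb
      rw [List.foldl_cons]
      refine ih _ (fun L' hL' => hall L' (List.mem_cons_of_mem _ hL')) ?_
      have hL := hall L (List.mem_cons_self)
      cases hc : c L with
      | none =>
          simp only [pvStepC, hc]
          exact hb
      | some hit =>
          have hhit := hL hit hc
          rcases hb with rfl | ⟨h', rfl, hle, heq⟩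
          · simp only [pvStepC, hc]
            exact Or.inr ⟨hit, rfl, hhit⟩
          · simp only [pvStepC, hc]
            by_cases hlt : hit.1 < h'.1
            · rw [if_pos hlt]; exact Or.inr ⟨hit, rfl, hhit⟩
            · rw [if_neg hlt]; exact Or.inr ⟨h', rfl, hle, heq⟩

theorem pvFoldKeep (c : Nat → Option (Int × Nat × String)) (h0 : Int × Nat × String) :
    ∀ Ls : List Nat, (∀ L ∈ Ls, ∀ h, c L = some h → h0.1 ≤ h.1) →
      Ls.foldl (pvStepC c) (some h0) = some h0 := by
  intro Ls
  induction Ls with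
  | nil => intro _; rfl
  | cons L Ls ih =>
      intro hall
      rw [List.foldl_cons]
      have : pvStepC c (some h0) L = some h0 := by
        cases hc : c L with
        | none => simp [pvStepC, hc]
        | some hit =>
            have := hall L (List.mem_cons_self) hit hc
            simp only [pvStepC, hc]
            rw [if_neg (by omega)]
      rw [this]
      exact ih (fun L' hL' => hall L' (List.mem_cons_of_mem _ hL'))

theorem pvFoldMin (c : Nat → Option (Int × Nat × String)) (h0 : Int × Nat × String)
    (L0 : Nat) (Ls : List Nat) (hmem : L0 ∈ Ls) (hc : c L0 = some h0)
    (hall : ∀ L ∈ Ls, ∀ h, c L = some h → h0.1 ≤ h.1 ∧ (h.1 = h0.1 → h = h0)) :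
    Ls.foldl (pvStepC c) none = some h0 := by
  obtain ⟨u, v, rfl⟩ := List.append_of_mem hmem
  rw [List.foldl_append, List.foldl_cons]
  have hP := pvFoldPre c h0 u none
    (fun L hL => hall L (List.mem_append_left _ hL)) (Or.inl rfl)
  have hstep : pvStepC c (u.foldl (pvStepC c) none) L0 = some h0 := by
    rcases hP with hnone | ⟨h', hsome, hle, heq⟩
    · rw [hnone]; simp [pvStepC, hc]
    · rw [hsome]
      simp only [pvStepC, hc]
      by_cases hlt : h0.1 < h'.1
      · rw [if_pos hlt]
      · rw [if_neg hlt]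
        rw [heq (by omega)]
  rw [hstep]
  exact pvFoldKeep c h0 v
    (fun L hL h hcl => (hall L (List.mem_append_right _ (List.mem_cons_of_mem _ hL)) h hcl).1)


theorem pvCand_spec {d : List (String × List String)} {qts : List String} {i L : Nat}
    {h : Int × Nat × String} (hc : pvCand d qts i L = some h) :
    ∃ p, p ∈ PySem.List.enumerate d 0 ∧ pvQ qts i p.2.1 ∧ h = pvF p ∧ pvLen p.2.1 = L := by
  unfold pvCand at hc
  split at hc
  case isFalse => cases hc
  rename_i hle
  rw [pvBuild_get_eq] at hc
  obtain ⟨p, hfind, rfl⟩ := Option.map_eq_some_iff.mp hc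
  have hmem := List.mem_of_find?_eq_some hfind
  obtain ⟨h1, h2⟩ : 1 < pvLen p.2.1 ∧ pvTup p.2.1
      = PySem.List.slice qts (some (i : Int)) (some ((i : Int) + (L : Int))) := by
    simpa using List.find?_some hfind
  have hwin : PySem.List.slice qts (some (i : Int)) (some ((i : Int) + (L : Int)))
      = (qts.drop i).take L := PySem.List.slice_natCast_add qts i L
  have hLlen : pvLen p.2.1 = L := by
    have hlen : (pvTup p.2.1).length = pvLen p.2.1 := by simp [pvTup, pvLen]
    rw [h2, hwin] at hlen
    simp only [List.length_take, List.length_drop] at hlen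
    omega
  refine ⟨p, hmem, ⟨h1, ?_, ?_⟩, rfl, hLlen⟩
  · rw [hLlen]; exact hle
  · rw [hLlen]; exact h2.symm

set_option maxHeartbeats 1000000 in
theorem pvStep_eq (d : List (String × List String)) (qts : List String) (i : Nat) :
    pvBBest (pvBuild d).1 qts (PySem.List.sorted (pvBuild d).2 (fun x => x) false) i
      = ((PySem.List.enumerate d 0).find? (fun p => decide (pvQ qts i p.2.1))).map pvF := by
  rw [pvBBest_eq_foldCand]
  cases hfirst : (PySem.List.enumerate d 0).find? (fun p => decide (pvQ qts i p.2.1)) with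
  | none =>
      rw [Option.map_none]
      refine pvFoldNone _ _ ?_
      intro L _
      cases hc : pvCand d qts i L with
      | none => rfl
      | some h =>
          obtain ⟨p, hmem, hq, _, _⟩ := pvCand_spec hc
          have := List.find?_eq_none.mp hfirst p hmem
          exact (this (by simp only [decide_eq_true_eq]; exact hq)).elim
  | some p0 =>
      rw [Option.map_some]
      have hp0mem := List.mem_of_find?_eq_some hfirst
      have hq0 : pvQ qts i p0.2.1 := by simpa using List.find?_some hfirst
      have hwin : PySem.List.slice qts (some (i : Int))
          (some ((i : Int) + ((pvLen p0.2.1 : Nat) : Int))) = (qts.drop i).take (pvLen p0.2.1) :=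
        PySem.List.slice_natCast_add qts i (pvLen p0.2.1)
      -- (a) the candidate at L0 := pvLen p0.2.1 is exactly pvF p0
      have hcand : pvCand d qts i (pvLen p0.2.1) = some (pvF p0) := by
        unfold pvCand
        rw [if_pos hq0.2.1]
        rw [pvBuild_get_eq]
        have hfind' : (PySem.List.enumerate d 0).find?
            (fun p => decide (1 < pvLen p.2.1 ∧ pvTup p.2.1
              = PySem.List.slice qts (some (i : Int))
                  (some ((i : Int) + ((pvLen p0.2.1 : Nat) : Int))))) = some p0 := by
          refine pvFind?_stronger (q := fun p => decide (pvQ qts i p.2.1)) ?_ hfirst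
            (by simp only [decide_eq_true_eq]; exact ⟨hq0.1, hq0.2.2.symm⟩)
          intro x hx
          obtain ⟨hx1, hx2⟩ : 1 < pvLen x.2.1 ∧ pvTup x.2.1
              = PySem.List.slice qts (some (i : Int))
                  (some ((i : Int) + ((pvLen p0.2.1 : Nat) : Int))) := by simpa using hx
          have hLx : pvLen x.2.1 = pvLen p0.2.1 := by
            have hlen : (pvTup x.2.1).length = pvLen x.2.1 := by simp [pvTup, pvLen]
            rw [hx2, hwin] at hlen
            simp only [List.length_take, List.length_drop] at hlen
            have := hq0.2.1
            omega
          simp only [decide_eq_true_eq]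
          refine ⟨hx1, ?_, ?_⟩
          · rw [hLx]; exact hq0.2.1
          · rw [hLx]; exact hx2.symm
        rw [hfind']
        rfl
      -- (b) every candidate has order ≥ p0's, with equality only at pvF p0
      have hall : ∀ L ∈ PySem.List.sorted (pvBuild d).2 (fun x => x) false,
          ∀ h, pvCand d qts i L = some h →
            (pvF p0).1 ≤ h.1 ∧ (h.1 = (pvF p0).1 → h = pvF p0) := by
        intro L _ h hc
        obtain ⟨p, hmem, hq, rfl, _⟩ := pvCand_spec hc
        have hmin := pvFind?_min (PySem.List.pairwise_lt_enumerate d 0) hfirst p hmem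
          (by simp only [decide_eq_true_eq]; exact hq)
        constructor
        · rcases hmin with rfl | hlt
          · exact le_refl _
          · exact le_of_lt hlt
        · intro heq
          have : p = p0 := pvEnum_fst_inj hmem hp0mem heq
          rw [this]
      -- (c) L0 is in the length set
      have hLmem : pvLen p0.2.1 ∈ PySem.List.sorted (pvBuild d).2 (fun x => x) false := by
        rw [PySem.List.mem_sorted]
        exact pvBuild_len_mem hp0mem hq0.1
      exact pvFoldMin _ _ _ _ hLmem hcand hall

theorem pvLoop_eq (qts : List String) (d : List (String × List String)) :
    ∀ (m i : Nat) (acc : List String), qts.length - i ≤ m →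
      pvALoop qts d i acc = pvBLoop qts d i acc := by
  intro m
  induction m with
  | zero =>
      intro i acc h
      rw [pvALoop.eq_def, pvBLoop.eq_def]
      rw [dif_neg (by omega), dif_neg (by omega)]
  | succ m ih =>
      intro i acc h
      by_cases hi : i < qts.length
      · rw [pvALoop.eq_def, pvBLoop.eq_def]
        rw [dif_pos hi, dif_pos hi]
        have hA := pvAFind_eq qts i d 0
        have hB := pvStep_eq d qts i
        cases hfirst : (PySem.List.enumerate d 0).find? (fun p => decide (pvQ qts i p.2.1)) with
        | none =>
            rw [hfirst] at hA hB
            simp only [Option.map_none] at hA hB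
            split
            · rename_i k vs heq
              rw [hA] at heq; cases heq
            · split
              · rename_i hit heq
                rw [hB] at heq; cases heq
              · cases hlk : pvLookup d (PySem.Str.lower (qts.getD i "")) with
                | none =>
                    simp only [hlk]
                    exact ih (i + 1) _ (by omega)
                | some vs =>
                    simp only [hlk]
                    split
                    · exact ih (i + 1) _ (by omega)
                    · exact ih (i + 1) _ (by omega)
        | some p0 =>
            rw [hfirst] at hA hB
            simp only [Option.map_some] at hA hB
            have hq0 : pvQ qts i p0.2.1 := by simpa using List.find?_some hfirst
            split
            · rename_i k vs heq
              rw [hA] at heq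
              injection heq with h'
              injection h' with hk hvs
              subst hk; subst hvs
              split
              · rename_i hit heqB
                rw [hB] at heqB
                injection heqB with h''
                subst h''
                simp only [pvF, pvLen]
                exact ih _ _ (by have := hq0.1; simp only [pvLen] at this; omega)
              · rename_i heqB
                rw [hB] at heqB; cases heqB
            · rename_i heq
              rw [hA] at heq; cases heq
      · rw [pvALoop.eq_def, pvBLoop.eq_def]
        rw [dif_neg hi, dif_neg hi]

-- ===== VERDICT (by name: the statement is the Claim_ definition above) =====
theorem expand_query_with_synonyms_spec : Claim_equal_expand_query_with_synonyms := by
  intro query synonym_dict _ _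
  unfold Spec_expand_query_with_synonyms expand_query_with_synonyms expand_query_with_synonyms_alt
  rw [pvLoop_eq (PySem.Str.split₀ query) synonym_dict (PySem.Str.split₀ query).length 0 [] (by omega)]
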